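-- pv_equiv track=rewrite | github.com/richkris91/Python.01 | Projects/Games/War Game :2 10x10_6x12_72pix/Text_WarGarme_01.py | terrain_adder
-- ===== SOURCE A (Python) =====
-- def terrain_adder(Tiles, Terrain_map):
--     ter_count = 0
--     for key in Tiles:
--         key1 = key
--         if 'Obj' in key1:
--             for key in Tiles[key1][0]:
--                 if 'Obj' in key:
--                     Tiles[key1][0][key].append(Terrain_map[ter_count])
--                     ter_count += 1
--     return Tiles
-- ===== SOURCE B (Python) =====
-- def terrain_adder(Tiles, Terrain_map):
--     # Pure two-stage rebuild (the input dict is NOT mutated; only the returned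
--     # value matches A): stage 1 pre-splits Terrain_map into one chunk per tile
--     # group, stage 2 rebuilds each group independently from its own chunk.
--     counts = [sum(1 for j in layers[0] if 'Obj' in j) if 'Obj' in k else 0
--               for k, layers in Tiles.items()]
--     chunks, pos = [], 0
--     for n in counts:
--         chunks.append(Terrain_map[pos:pos + n])
--         pos += n
--     result = {}
--     for (k, layers), chunk in zip(Tiles.items(), chunks):
--         if 'Obj' in k:
--             first = layers[0]
--             names = [j for j in first if 'Obj' in j]
--             rebuilt = {j: first[j] + [chunk[names.index(j)]] if 'Obj' in j else first[j]
--                        for j in first}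
--             result[k] = [rebuilt] + layers[1:]
--         else:
--             result[k] = layers
--     return result
-- ===== Notes on version B (the rewrite author's own statement) =====
-- stated objective: alternative
-- what changed: A threads one mutable counter through braided nested loops and appends in place; B is a pure two-stage rebuild: it first pre-splits Terrain_map into one slice-chunk per tile group (via per-group Obj counts), then reconstructs each group independently from its own chunk by local name position, returning a new dict without mutating the input.
import Mathlib
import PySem

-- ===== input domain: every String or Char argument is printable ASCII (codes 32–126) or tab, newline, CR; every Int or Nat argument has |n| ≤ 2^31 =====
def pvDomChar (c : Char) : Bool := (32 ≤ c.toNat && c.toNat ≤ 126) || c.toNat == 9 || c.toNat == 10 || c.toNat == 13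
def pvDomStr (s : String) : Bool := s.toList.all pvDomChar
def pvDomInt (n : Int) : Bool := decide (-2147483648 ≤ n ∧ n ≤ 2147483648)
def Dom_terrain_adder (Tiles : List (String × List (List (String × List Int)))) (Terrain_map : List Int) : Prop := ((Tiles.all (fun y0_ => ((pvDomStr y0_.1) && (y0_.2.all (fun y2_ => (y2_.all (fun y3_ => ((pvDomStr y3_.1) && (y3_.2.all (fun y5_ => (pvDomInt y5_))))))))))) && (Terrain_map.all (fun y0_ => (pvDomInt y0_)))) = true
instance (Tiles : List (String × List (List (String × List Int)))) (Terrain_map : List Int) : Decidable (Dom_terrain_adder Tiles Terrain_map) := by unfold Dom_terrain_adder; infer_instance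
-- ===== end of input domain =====

-- B replaces A's in-place, counter-threaded nested loop with a pure two-stage rebuild
-- (pre-split Terrain_map into per-group chunks, then rebuild each group from its own chunk);
-- A mutates Tiles in place, B does not — the theorems are about the RETURNED value only.

-- ===== PORT A =====
-- A's inner loop: walk the first dict of an 'Obj' entry, appending Terrain_map[ter_count] to 'Obj'-keyed lists.
def taInner (Terrain_map : List Int) (st : List (String × List Int) × Nat) (e : String × List Int) :
    List (String × List Int) × Nat :=
  if PySem.Str.isIn "Obj" e.1 then
    (st.1 ++ [(e.1, e.2 ++ [Terrain_map.getD st.2 0])], st.2 + 1)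
  else (st.1 ++ [e], st.2)

-- A's outer loop body (Python raises IndexError on Tiles[key1][0] when the tile list is empty; Pre_ excludes that).
def taStep (Terrain_map : List Int)
    (st : List (String × List (List (String × List Int))) × Nat)
    (entry : String × List (List (String × List Int))) :
    List (String × List (List (String × List Int))) × Nat :=
  if PySem.Str.isIn "Obj" entry.1 then
    match entry.2 with
    | [] => (st.1 ++ [entry], st.2)
    | d :: rest =>
      let inner := d.foldl (taInner Terrain_map) ([], st.2)
      (st.1 ++ [(entry.1, inner.1 :: rest)], inner.2)
  else (st.1 ++ [entry], st.2)

def terrain_adder (Tiles : List (String × List (List (String × List Int)))) (Terrain_map : List Int) :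
    List (String × List (List (String × List Int))) :=
  (Tiles.foldl (taStep Terrain_map) ([], 0)).1

-- ===== PORT B =====
-- Stage-1a of Source B: per-group target counts ('Obj' group: number of 'Obj' keys in its first dict, else 0).
def tbCounts (Tiles : List (String × List (List (String × List Int)))) : List Nat :=
  Tiles.map (fun e =>
    if PySem.Str.isIn "Obj" e.1 then (e.2.headD []).countP (fun j => PySem.Str.isIn "Obj" j.1) else 0)

-- Stage-1b of Source B: split Terrain_map into consecutive slice-chunks, one per count.
def tbChunkStep (Terrain_map : List Int) (st : List (List Int) × Nat) (n : Nat) :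
    List (List Int) × Nat :=
  (st.1 ++ [PySem.List.slice Terrain_map (some (st.2 : Int)) (some ((st.2 : Int) + (n : Int)))],
   st.2 + n)

def tbChunks (Terrain_map : List Int) (counts : List Nat) : List (List Int) :=
  (counts.foldl (tbChunkStep Terrain_map) (([] : List (List Int)), (0 : Nat))).1

-- Stage 2 of Source B: rebuild one (group, chunk) pair; an 'Obj'-keyed list gets chunk[names.index(key)].
def tbRebuildEntry (p : (String × List (List (String × List Int))) × List Int) :
    String × List (List (String × List Int)) :=
  if PySem.Str.isIn "Obj" p.1.1 then
    let first := p.1.2.headD []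
    let names := (first.filter (fun j => PySem.Str.isIn "Obj" j.1)).map Prod.fst
    (p.1.1,
      (first.map (fun j =>
        if PySem.Str.isIn "Obj" j.1 then (j.1, j.2 ++ [p.2.getD (names.idxOf j.1) 0]) else j))
        :: p.1.2.tail)
  else p.1

def terrain_adder_alt (Tiles : List (String × List (List (String × List Int)))) (Terrain_map : List Int) :
    List (String × List (List (String × List Int))) :=
  (Tiles.zip (tbChunks Terrain_map (tbCounts Tiles))).map tbRebuildEntry

-- ===== PRECONDITION & SPEC =====
-- the number of (outer 'Obj', inner 'Obj') targets, stated independently of either port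
def pvNumTargets (Tiles : List (String × List (List (String × List Int)))) : Nat :=
  (Tiles.map (fun e =>
    if PySem.Str.isIn "Obj" e.1 then (e.2.headD []).countP (fun j => PySem.Str.isIn "Obj" j.1) else 0)).sum

-- Pre_ excludes assoc lists with duplicate keys (they do not represent Python dicts, so A's lookup-vs-iteration
-- behaviour there is unspecifiable) and the inputs where A raises IndexError (an 'Obj' entry whose tile list is
-- empty, or more targets than Terrain_map holds).
def Pre_terrain_adder (Tiles : List (String × List (List (String × List Int)))) (Terrain_map : List Int) : Prop :=
  (Tiles.map Prod.fst).Nodup ∧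
  (∀ e ∈ Tiles, ∀ d ∈ e.2, (d.map Prod.fst).Nodup) ∧
  (∀ e ∈ Tiles, PySem.Str.isIn "Obj" e.1 = true → e.2 ≠ []) ∧
  pvNumTargets Tiles ≤ Terrain_map.length
instance (Tiles : List (String × List (List (String × List Int)))) (Terrain_map : List Int) : Decidable (Pre_terrain_adder Tiles Terrain_map) := by unfold Pre_terrain_adder; infer_instance

def pvWitness_terrain_adder : (List (String × List (List (String × List Int)))) × List Int :=
  ([("Obj1", [[("ObjA", [1, 2]), ("grass", [0])]]), ("meta", [[]])], [7, 8])

def Spec_terrain_adder (Tiles : List (String × List (List (String × List Int)))) (Terrain_map : List Int) (out : List (String × List (List (String × List Int)))) : Prop := out = terrain_adder_alt Tiles Terrain_map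
instance (Tiles : List (String × List (List (String × List Int)))) (Terrain_map : List Int) (out : List (String × List (List (String × List Int)))) : Decidable (Spec_terrain_adder Tiles Terrain_map out) := by unfold Spec_terrain_adder; infer_instance

-- ===== CLAIM =====
def Claim_equal_terrain_adder : Prop := ∀ (Tiles : List (String × List (List (String × List Int)))) (Terrain_map : List Int), Dom_terrain_adder Tiles Terrain_map → Pre_terrain_adder Tiles Terrain_map → Spec_terrain_adder Tiles Terrain_map (terrain_adder Tiles Terrain_map)

-- ===== LEMMAS AND PROOFS =====

theorem taInner_obj (T : List Int) (st : List (String × List Int) × Nat) (e : String × List Int)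
    (h : PySem.Str.isIn "Obj" e.1 = true) :
    taInner T st e = (st.1 ++ [(e.1, e.2 ++ [T.getD st.2 0])], st.2 + 1) := by
  unfold taInner; rw [if_pos h]

theorem taInner_not_obj (T : List Int) (st : List (String × List Int) × Nat) (e : String × List Int)
    (h : ¬ PySem.Str.isIn "Obj" e.1 = true) :
    taInner T st e = (st.1 ++ [e], st.2) := by
  unfold taInner; rw [if_neg h]

-- A's inner loop unrolled: the counter advances by the count of 'Obj' keys, and under Nodup keys each
-- 'Obj' entry gets Terrain_map[c + its idxOf among the filtered keys].
theorem taInner_foldl (T : List Int) (d : List (String × List Int))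
    (hnd : (d.map Prod.fst).Nodup) (acc : List (String × List Int)) (c : Nat) :
    d.foldl (taInner T) (acc, c) =
      (acc ++ d.map (fun j =>
          if PySem.Str.isIn "Obj" j.1 then
            (j.1, j.2 ++ [T.getD (c + List.idxOf j.1 ((d.filter (fun x => PySem.Str.isIn "Obj" x.1)).map Prod.fst)) 0])
          else j),
       c + d.countP (fun j => PySem.Str.isIn "Obj" j.1)) := by
  induction d generalizing acc c with
  | nil => simp
  | cons j tl ih =>
    simp only [List.map_cons, List.nodup_cons, List.mem_map] at hnd
    obtain ⟨hj, hnd'⟩ := hnd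
    have hne : ∀ x ∈ tl, j.1 ≠ x.1 := by
      intro x hx hEq
      exact hj ⟨x, hx, hEq.symm⟩
    rw [List.foldl_cons]
    by_cases h : PySem.Str.isIn "Obj" j.1 = true
    · rw [taInner_obj T _ j h, ih hnd']
      dsimp only
      rw [List.filter_cons_of_pos (p := fun x : String × List Int => PySem.Str.isIn "Obj" x.1)
            (l := tl) h,
          List.countP_cons_of_pos (p := fun x : String × List Int => PySem.Str.isIn "Obj" x.1)
            (l := tl) h]
      refine Prod.ext ?_ (by omega)
      simp only [List.map_cons, List.idxOf_cons, beq_self_eq_true, cond_true, Nat.add_zero]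
      rw [List.append_assoc]
      simp only [List.singleton_append, if_pos h]
      congr 1
      congr 1
      apply List.map_congr_left
      intro x hx
      by_cases hox : PySem.Str.isIn "Obj" x.1 = true
      · rw [if_pos hox, if_pos hox]
        have hb : (j.1 == x.1) = false := beq_eq_false_iff_ne.mpr (hne x hx)
        rw [hb]
        simp only [cond_false]
        have harith : c + 1 + List.idxOf x.1 ((tl.filter (fun x => PySem.Str.isIn "Obj" x.1)).map Prod.fst)
            = c + (List.idxOf x.1 ((tl.filter (fun x => PySem.Str.isIn "Obj" x.1)).map Prod.fst) + 1) := by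
          omega
        rw [harith]
      · rw [if_neg hox, if_neg hox]
    · rw [taInner_not_obj T _ j h, ih hnd']
      dsimp only
      rw [List.filter_cons_of_neg (p := fun x : String × List Int => PySem.Str.isIn "Obj" x.1)
            (l := tl) h,
          List.countP_cons_of_neg (p := fun x : String × List Int => PySem.Str.isIn "Obj" x.1)
            (l := tl) h]
      refine Prod.ext ?_ rfl
      rw [List.append_assoc]
      simp only [List.map_cons, List.singleton_append, if_neg h]

-- proof-only description of B's chunk list starting at offset pos
def tbChunksFrom (T : List Int) (pos : Nat) : List Nat → List (List Int)
  | [] => []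
  | n :: cs =>
    PySem.List.slice T (some (pos : Int)) (some ((pos : Int) + (n : Int))) :: tbChunksFrom T (pos + n) cs

theorem tbChunks_fold (T : List Int) :
    ∀ (counts : List Nat) (acc : List (List Int)) (pos : Nat),
      (counts.foldl (tbChunkStep T) (acc, pos)).1 = acc ++ tbChunksFrom T pos counts := by
  intro counts
  induction counts with
  | nil => intro acc pos; simp [tbChunksFrom]
  | cons n cs ih =>
    intro acc pos
    rw [List.foldl_cons]
    have hstep : tbChunkStep T (acc, pos) n =
        (acc ++ [PySem.List.slice T (some (pos : Int)) (some ((pos : Int) + (n : Int)))], pos + n) := rfl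
    rw [hstep, ih, tbChunksFrom, List.append_assoc]
    rfl

theorem tbChunks_eq (T : List Int) (counts : List Nat) :
    tbChunks T counts = tbChunksFrom T 0 counts := by
  unfold tbChunks
  exact tbChunks_fold T counts [] 0

-- a chunk element, read within its bounds, IS the corresponding global element (both default to 0 past the end)
theorem slice_getD (T : List Int) (pos n i : Nat) (hi : i < n) :
    (PySem.List.slice T (some (pos : Int)) (some ((pos : Int) + (n : Int)))).getD i 0 =
      T.getD (pos + i) 0 := by
  rw [PySem.List.slice_natCast_add]
  simp only [List.getD]
  rw [List.getElem?_take_of_lt hi, List.getElem?_drop]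

-- main generalized invariant: A's outer fold from counter pos equals B's rebuild from chunks starting at pos
theorem main_fold (T : List Int) :
    ∀ (Ts : List (String × List (List (String × List Int))))
      (acc : List (String × List (List (String × List Int)))) (pos : Nat),
      (∀ e ∈ Ts, ((e.2.headD []).map Prod.fst).Nodup) →
      (∀ e ∈ Ts, PySem.Str.isIn "Obj" e.1 = true → e.2 ≠ []) →
      (Ts.foldl (taStep T) (acc, pos)).1 =
        acc ++ (Ts.zip (tbChunksFrom T pos (tbCounts Ts))).map tbRebuildEntry := by
  intro Ts
  induction Ts with
  | nil => intro acc pos _ _; simp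
  | cons e rest ih =>
    intro acc pos hnd hne
    obtain ⟨k, lst⟩ := e
    rw [List.foldl_cons]
    by_cases h : PySem.Str.isIn "Obj" k = true
    · cases lst with
      | nil => exact absurd rfl (hne (k, []) List.mem_cons_self h)
      | cons d r2 =>
        have hstep : taStep T (acc, pos) (k, d :: r2) =
            (acc ++ [(k, (d.foldl (taInner T) ([], pos)).1 :: r2)],
             (d.foldl (taInner T) ([], pos)).2) := by
          unfold taStep; rw [if_pos h]
        rw [hstep]
        have hind : (d.map Prod.fst).Nodup := by
          have := hnd (k, d :: r2) List.mem_cons_self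
          simpa using this
        rw [taInner_foldl T d hind [] pos]
        set fk : List String := (d.filter (fun x => PySem.Str.isIn "Obj" x.1)).map Prod.fst with hfk
        have hcnt : d.countP (fun j => PySem.Str.isIn "Obj" j.1) = fk.length := by
          simp [hfk, List.countP_eq_length_filter]
        -- unfold B's side one step
        have hcounts : tbCounts ((k, d :: r2) :: rest) =
            d.countP (fun j => PySem.Str.isIn "Obj" j.1) :: tbCounts rest := by
          simp only [tbCounts, List.map_cons]
          rw [if_pos h]
          rfl
        rw [hcounts, tbChunksFrom, List.zip_cons_cons, List.map_cons]
        have hentry : tbRebuildEntry ((k, d :: r2),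
            PySem.List.slice T (some (pos : Int))
              (some ((pos : Int) + ((d.countP fun j => PySem.Str.isIn "Obj" j.1 : Nat) : Int)))) =
            (k, (d.map (fun j =>
              if PySem.Str.isIn "Obj" j.1 then
                (j.1, j.2 ++ [T.getD (pos + List.idxOf j.1 fk) 0])
              else j)) :: r2) := by
          unfold tbRebuildEntry
          rw [if_pos h]
          simp only [List.headD_cons, List.tail_cons]
          congr 2
          apply List.map_congr_left
          intro j hj
          by_cases hoj : PySem.Str.isIn "Obj" j.1 = true
          · rw [if_pos hoj, if_pos hoj]
            have hmem : j.1 ∈ fk := by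
              simp only [hfk, List.mem_map]
              exact ⟨j, List.mem_filter.mpr ⟨hj, hoj⟩, rfl⟩
            have hlt : List.idxOf j.1 fk < fk.length := List.idxOf_lt_length_of_mem hmem
            rw [hcnt, slice_getD T pos fk.length _ hlt]
          · rw [if_neg hoj, if_neg hoj]
        rw [hentry]
        have := ih (acc ++ [(k, (d.map (fun j =>
            if PySem.Str.isIn "Obj" j.1 then
              (j.1, j.2 ++ [T.getD (pos + List.idxOf j.1 fk) 0])
            else j)) :: r2)]) (pos + d.countP (fun j => PySem.Str.isIn "Obj" j.1))
          (fun e' he' => hnd e' (List.mem_cons_of_mem _ he'))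
          (fun e' he' hh => hne e' (List.mem_cons_of_mem _ he') hh)
        simp only [List.nil_append] at this ⊢
        rw [this, List.append_assoc]
        rfl
    · have hstep : taStep T (acc, pos) (k, lst) = (acc ++ [(k, lst)], pos) := by
        unfold taStep; rw [if_neg h]
      rw [hstep]
      have hcounts : tbCounts ((k, lst) :: rest) = 0 :: tbCounts rest := by
        simp only [tbCounts, List.map_cons]
        rw [if_neg h]
      rw [hcounts, tbChunksFrom, List.zip_cons_cons, List.map_cons]
      have hentry : tbRebuildEntry ((k, lst),
          PySem.List.slice T (some (pos : Int)) (some ((pos : Int) + ((0 : Nat) : Int)))) = (k, lst) := by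
        unfold tbRebuildEntry
        rw [if_neg h]
      rw [hentry]
      have := ih (acc ++ [(k, lst)]) (pos + 0)
        (fun e' he' => hnd e' (List.mem_cons_of_mem _ he'))
        (fun e' he' hh => hne e' (List.mem_cons_of_mem _ he') hh)
      rw [Nat.add_zero] at this
      rw [this, List.append_assoc]
      rfl

-- ===== VERDICT (by name: the statement is the Claim_ definition above) =====
theorem terrain_adder_spec : Claim_equal_terrain_adder := by
  intro Tiles T _hdom hpre
  obtain ⟨_h1, h2, h3, _h4⟩ := hpre
  unfold Spec_terrain_adder terrain_adder terrain_adder_alt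
  rw [tbChunks_eq]
  have := main_fold T Tiles [] 0
    (fun e he => by
      cases h : e.2 with
      | nil => simp
      | cons d rest =>
        have := h2 e he d (by simp [h])
        simpa [h] using this)
    h3
  simpa using this
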